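-- pv_equiv track=rewrite | github.com/fernandoaafonseca/daily-coding | python/python-exercises/ex_071_cs50p_week_2_loops_04_vanity_plates/main.py | are_numbers_at_the_end
-- ===== SOURCE A (Python) =====
-- def are_numbers_at_the_end(user_plate: str) -> bool:
--     '''
--     Checks if the numbers are at the end of the plate.
--     '''
--     found_number = False
--
--     for char in user_plate:
--         if char.isdigit():
--             found_number = True
--         elif found_number:
--             # If there's a letter after a number, the plate is "Invalid"
--             return False
--
--     return True
--
--     return True
-- ===== SOURCE B (Python) =====
-- def are_numbers_at_the_end(user_plate: str) -> bool:
--     # Counting characterization: all digits sit at the end iff the total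
--     # number of digits equals the length of the maximal trailing digit run.
--     trailing = 0
--     for c in reversed(user_plate):
--         if not c.isdigit():
--             break
--         trailing += 1
--     return sum(1 for c in user_plate if c.isdigit()) == trailing
-- ===== Notes on version B (the rewrite author's own statement) =====
-- stated objective: alternative
-- what changed: Replaces A's forward flag-carrying state machine (fail on first non-digit after a digit) with a counting characterization: measure the trailing digit run from the reversed string and compare it with the total digit count.
import Mathlib
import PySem

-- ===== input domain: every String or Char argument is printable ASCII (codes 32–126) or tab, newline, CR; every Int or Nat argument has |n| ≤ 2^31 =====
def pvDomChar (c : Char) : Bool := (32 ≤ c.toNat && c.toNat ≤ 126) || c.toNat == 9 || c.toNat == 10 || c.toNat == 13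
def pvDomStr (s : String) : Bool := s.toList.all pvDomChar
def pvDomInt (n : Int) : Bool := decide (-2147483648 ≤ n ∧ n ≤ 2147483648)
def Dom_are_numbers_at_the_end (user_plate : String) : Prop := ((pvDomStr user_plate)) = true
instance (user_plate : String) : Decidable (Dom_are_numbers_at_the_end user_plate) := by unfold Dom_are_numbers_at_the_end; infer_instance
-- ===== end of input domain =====

-- B replaces A's forward flag state machine by a counting characterization
-- (trailing digit-run length vs total digit count); alternative, same cost.

-- ===== PORT A =====
-- the for-loop with its 'found_number' flag and early 'return False'
def pvALoop : List Char → Bool → Bool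
  | [], _ => true
  | c :: cs, found =>
    if PySem.Chars.isdigit c then pvALoop cs true
    else if found then false
    else pvALoop cs found

def are_numbers_at_the_end (user_plate : String) : Bool :=
  pvALoop user_plate.toList false

-- ===== PORT B =====
-- the 'for c in reversed(...)' loop with break: length of the trailing digit run
def pvTrail : List Char → Nat
  | [] => 0
  | c :: cs => if PySem.Chars.isdigit c then pvTrail cs + 1 else 0

def are_numbers_at_the_end_alt (user_plate : String) : Bool :=
  user_plate.toList.countP PySem.Chars.isdigit == pvTrail user_plate.toList.reverse

-- ===== PRECONDITION & SPEC =====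
def Spec_are_numbers_at_the_end (user_plate : String) (out : Bool) : Prop := out = are_numbers_at_the_end_alt user_plate
instance (user_plate : String) (out : Bool) : Decidable (Spec_are_numbers_at_the_end user_plate out) := by unfold Spec_are_numbers_at_the_end; infer_instance

-- ===== CLAIM (what is proved, stated in full; the proofs are below) =====
def Claim_equal_are_numbers_at_the_end : Prop := ∀ (user_plate : String), Dom_are_numbers_at_the_end user_plate → Spec_are_numbers_at_the_end user_plate (are_numbers_at_the_end user_plate)

-- ===== LEMMAS AND PROOFS =====

-- 'Good l' = the plate l splits into a digit-free part followed by an all-digit part.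
def pvGood (l : List Char) : Prop :=
  ∃ a b, l = a ++ b ∧ (∀ c ∈ a, ¬ PySem.Chars.isdigit c) ∧ (∀ c ∈ b, PySem.Chars.isdigit c = true)

theorem pvALoop_true (l : List Char) : pvALoop l true = l.all PySem.Chars.isdigit := by
  induction l with
  | nil => rfl
  | cons c cs ih =>
    by_cases h : PySem.Chars.isdigit c <;> simp [pvALoop, h, ih]

theorem pvA_good (l : List Char) : pvALoop l false = true ↔ pvGood l := by
  induction l with
  | nil => exact ⟨fun _ => ⟨[], [], by simp⟩, fun _ => rfl⟩
  | cons c cs ih =>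
    by_cases h : PySem.Chars.isdigit c
    · rw [show pvALoop (c :: cs) false = pvALoop cs true from by simp [pvALoop, h],
        pvALoop_true]
      constructor
      · intro hall
        exact ⟨[], c :: cs, by simp, by simp, by
          intro x hx
          rcases List.mem_cons.mp hx with rfl | hx
          · exact h
          · exact (List.all_eq_true.mp hall) x hx⟩
      · rintro ⟨a, b, heq, ha, hb⟩
        cases a with
        | nil =>
          simp at heq; subst heq
          exact List.all_eq_true.mpr fun x hx => hb x (List.mem_cons_of_mem _ hx)
        | cons a0 as =>
          simp at heq
          exact absurd h (by rw [heq.1]; simpa using ha a0 (by simp))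
    · rw [show pvALoop (c :: cs) false = pvALoop cs false from by simp [pvALoop, h]]
      rw [ih]
      constructor
      · rintro ⟨a, b, heq, ha, hb⟩
        exact ⟨c :: a, b, by simp [heq], by
          intro x hx
          rcases List.mem_cons.mp hx with rfl | hx
          · exact h
          · exact ha x hx, hb⟩
      · rintro ⟨a, b, heq, ha, hb⟩
        cases a with
        | nil =>
          cases b with
          | nil => simp at heq
          | cons b0 bs =>
            simp at heq
            exact absurd (heq.1 ▸ hb b0 (by simp)) h
        | cons a0 as =>
          simp at heq
          exact ⟨as, b, heq.2, fun x hx => ha x (List.mem_cons_of_mem _ hx), hb⟩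

theorem pvTrail_eq (m : List Char) :
    pvTrail m = (m.takeWhile PySem.Chars.isdigit).length := by
  induction m with
  | nil => rfl
  | cons c cs ih =>
    by_cases h : PySem.Chars.isdigit c <;>
      simp [pvTrail, h, ih]

theorem pvB_good (l : List Char) :
    (l.countP PySem.Chars.isdigit == pvTrail l.reverse) = true ↔ pvGood l := by
  rw [beq_iff_eq, pvTrail_eq]
  set d := PySem.Chars.isdigit with hd
  have hsplit : l.reverse.takeWhile d ++ l.reverse.dropWhile d = l.reverse :=
    List.takeWhile_append_dropWhile
  have hcount : l.countP d
      = (l.reverse.takeWhile d).length + (l.reverse.dropWhile d).countP d := by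
    conv_lhs => rw [← List.countP_reverse, ← hsplit]
    rw [List.countP_append, List.countP_eq_length.mpr (fun c hc => List.mem_takeWhile_imp hc)]
  constructor
  · intro heq
    have h0 : (l.reverse.dropWhile d).countP d = 0 := by omega
    refine ⟨(l.reverse.dropWhile d).reverse, (l.reverse.takeWhile d).reverse, ?_, ?_, ?_⟩
    · rw [← List.reverse_append, hsplit, List.reverse_reverse]
    · intro c hc
      have hmem : c ∈ l.reverse.dropWhile d := by simpa using hc
      simpa using List.countP_eq_zero.mp h0 c hmem
    · intro c hc
      exact List.mem_takeWhile_imp (by simpa using hc)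
  · rintro ⟨a, b, rfl, ha, hb⟩
    have hbrev : ∀ c ∈ b.reverse, d c := fun c hc => hb c (by simpa using hc)
    have hbnil : List.dropWhile d b.reverse = [] := by
      rw [List.dropWhile_eq_nil_iff]
      intro c hc; simp [hbrev c hc]
    have hdrop : (a ++ b).reverse.dropWhile d = a.reverse.dropWhile d := by
      rw [List.reverse_append, List.dropWhile_append, hbnil]
      simp
    have h0 : ((a ++ b).reverse.dropWhile d).countP d = 0 := by
      rw [hdrop]
      exact List.countP_eq_zero.mpr fun c hc => by
        have : c ∈ a := by simpa using (List.dropWhile_sublist (l := a.reverse) (p := d)).mem hc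
        simpa using ha c this
    omega

-- ===== VERDICT (by name: the statement is the Claim_ definition above) =====
theorem are_numbers_at_the_end_spec : Claim_equal_are_numbers_at_the_end := by
  intro s _
  unfold Spec_are_numbers_at_the_end are_numbers_at_the_end are_numbers_at_the_end_alt
  have hA := pvA_good s.toList
  have hB := pvB_good s.toList
  cases hval : pvALoop s.toList false with
  | true => exact (hB.mpr (hA.mp hval)).symm
  | false =>
    by_cases h : (s.toList.countP PySem.Chars.isdigit == pvTrail s.toList.reverse) = true
    · rw [hA.mpr (hB.mp h)] at hval
      exact absurd hval (by simp)
    · simp only [Bool.not_eq_true] at h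
      rw [h]
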